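-- pv_equiv track=rewrite | github.com/kanatakayasu/apriori-window | paper/E-topk-adaptive-window/implementation/python/scale_space.py | build_dense_indicator
-- ===== SOURCE A (Python) =====
-- import math
-- from bisect import bisect_left, bisect_right
-- from typing import Dict, List, Optional, Sequence, Set, Tuple
--
-- def build_dense_indicator(
--     timestamps: Sequence[int],
--     w0: int,
--     theta0: int,
--     n: int,
-- ) -> Tuple[List[List[bool]], List[Tuple[int, int]]]:
--     """
--     Build the dense indicator matrix phi(level, position).
--
--     phi(ell, t) = True iff s_P^{W_ell}(t) >= theta_ell
--
--     Returns:
--         (matrix, level_params) where level_params[i] = (W_i, theta_i)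
--     """
--     ts = list(timestamps)
--     max_level = max(0, int(math.log2(max(1, n // w0))))
--     level_params: List[Tuple[int, int]] = []
--     matrix: List[List[bool]] = []
--
--     for ell in range(max_level + 1):
--         w = (2 ** ell) * w0
--         if w > n:
--             break
--         theta = max(1, math.ceil(theta0 * (2 ** ell)))
--         level_params.append((w, theta))
--
--         # Compute dense indicator for this level
--         num_positions = max(0, n - w + 1)
--         row = [False] * num_positions
--         for t in range(num_positions):
--             start_idx = bisect_left(ts, t)
--             end_idx = bisect_right(ts, t + w)
--             if (end_idx - start_idx) >= theta:
--                 row[t] = True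
--         matrix.append(row)
--
--     return matrix, level_params
-- ===== SOURCE B (Python) =====
-- from bisect import bisect_left, bisect_right
--
--
-- def build_dense_indicator(timestamps, w0, theta0, n):
--     ts = list(timestamps)
--     # level schedule by doubling (integer bit_length instead of float log2)
--     m = max(1, n // w0)
--     levels = []
--     w, scale = w0, 1
--     for _ in range(m.bit_length()):  # bit_length(m) = max_level + 1
--         if w > n:
--             break
--         levels.append((w, max(1, theta0 * scale)))
--         w *= 2
--         scale *= 2
--     if not levels:
--         return [], []
--     positions = [max(0, n - wl + 1) for (wl, _) in levels]
--     max_p = max(positions)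
--     min_w = min(wl for (wl, _) in levels)
--     # the two binary-search tables, computed ONCE for all levels
--     left = [bisect_left(ts, t) for t in range(max_p)]
--     right = [bisect_right(ts, v) for v in range(min_w, n + 1)]
--     matrix = [
--         [right[t + wl - min_w] - left[t] >= theta for t in range(p)]
--         for (wl, theta), p in zip(levels, positions)
--     ]
--     return matrix, levels
-- ===== Notes on version B (the rewrite author's own statement) =====
-- stated objective: alternative
-- what changed: B computes the level schedule by doubling w and scale with integer bit_length instead of float log2, hoists the binary searches out of the level loop into two bisect tables (bisect_left over all positions, bisect_right over all window ends) built once, and emits each level's row as a scan of table lookups.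
import Mathlib
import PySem

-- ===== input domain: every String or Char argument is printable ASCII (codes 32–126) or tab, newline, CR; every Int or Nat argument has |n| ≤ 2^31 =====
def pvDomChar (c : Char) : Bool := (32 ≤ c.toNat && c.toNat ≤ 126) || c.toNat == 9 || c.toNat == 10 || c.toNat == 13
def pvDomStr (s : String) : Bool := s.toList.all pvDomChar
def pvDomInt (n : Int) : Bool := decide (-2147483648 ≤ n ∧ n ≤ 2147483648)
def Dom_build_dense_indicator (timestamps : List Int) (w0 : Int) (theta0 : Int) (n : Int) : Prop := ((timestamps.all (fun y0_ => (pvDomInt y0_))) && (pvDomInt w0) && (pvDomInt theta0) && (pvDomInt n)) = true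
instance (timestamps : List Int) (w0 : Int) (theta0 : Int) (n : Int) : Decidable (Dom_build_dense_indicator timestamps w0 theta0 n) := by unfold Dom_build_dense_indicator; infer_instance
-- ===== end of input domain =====

-- B computes the level schedule by doubling with integer bit_length instead of float log2 and reads
-- per-position counts from two bisect tables built once before the level loop (objective: alternative).

-- ===== PORT A =====
-- one level's row: row = [False]*num_positions, then row[t] = True iff
-- bisect_right(ts, t+w) - bisect_left(ts, t) >= theta  — net effect: a map over range(num_positions)
def pvRowA (ts : List Int) (w : Int) (theta : Int) (n : Int) : List Bool :=
  (List.range (max 0 (n - w + 1)).toNat).map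
    (fun (t : Nat) => decide (theta ≤ ((PySem.List.bisectRight ts ((t : Int) + w) : Int)
                               - (PySem.List.bisectLeft ts (t : Int) : Int))))

-- the 'for ell in range(max_level + 1)' loop with its 'if w > n: break'
def pvALoop (ts : List Int) (w0 : Int) (theta0 : Int) (n : Int) (ells : List Nat)
    (mat : List (List Bool)) (lp : List (Int × Int)) : List (List Bool) × List (Int × Int) :=
  match ells with
  | [] => (mat, lp)
  | ell :: rest =>
    let w := 2 ^ ell * w0
    if n < w then (mat, lp)
    else
      -- theta = max(1, math.ceil(theta0 * 2**ell)); ceil of an int is that int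
      let theta := max 1 (theta0 * 2 ^ ell)
      pvALoop ts w0 theta0 n rest (mat ++ [pvRowA ts w theta n]) (lp ++ [(w, theta)])

def build_dense_indicator (timestamps : List Int) (w0 : Int) (theta0 : Int) (n : Int) :
    List (List Bool) × (List (Int × Int)) :=
  let ts := timestamps
  -- max_level = max(0, int(math.log2(max(1, n // w0)))): for m ≥ 1 (and |m| ≤ 2^31, guaranteed
  -- on Dom) float log2 truncated is exactly Nat.log2 m, which is ≥ 0, so max(0, ·) is the identity
  let maxLevel : Nat := Nat.log2 (max 1 (PySem.Int.floordiv n w0)).toNat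
  pvALoop ts w0 theta0 n (List.range (maxLevel + 1)) [] []

-- ===== PORT B =====
-- B's schedule loop: 'for _ in range(m.bit_length())' with w and scale doubling and the same break
def pvBLevels (theta0 : Int) (n : Int) (count : Nat) (w : Int) (scale : Int)
    (levels : List (Int × Int)) : List (Int × Int) :=
  match count with
  | 0 => levels
  | c + 1 =>
    if n < w then levels
    else pvBLevels theta0 n c (w * 2) (scale * 2) (levels ++ [(w, max 1 (theta0 * scale))])

def build_dense_indicator_alt (timestamps : List Int) (w0 : Int) (theta0 : Int) (n : Int) :
    List (List Bool) × (List (Int × Int)) :=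
  let ts := timestamps
  let m : Int := max 1 (PySem.Int.floordiv n w0)
  -- m.bit_length() for m ≥ 1 is Nat.size
  let levels := pvBLevels theta0 n (Nat.size m.toNat) w0 1 []
  if levels.isEmpty then ([], [])
  else
    let positions := levels.map (fun l => max 0 (n - l.1 + 1))
    let maxP : Int := (PySem.List.max? positions id).getD 0      -- max(positions); levels ≠ [] so max? = some
    let minW : Int := (PySem.List.min? (levels.map Prod.fst) id).getD 0  -- min(wl for (wl, _) in levels)
    let left := (List.range maxP.toNat).map (fun (t : Nat) => (PySem.List.bisectLeft ts (t : Int) : Int))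
    let right := (PySem.List.pyRange minW (n + 1)).map (fun v => (PySem.List.bisectRight ts v : Int))
    -- right[t + wl - min_w] and left[t]: both indices are proved in range below, so getD's default is never taken
    let matrix := (levels.zip positions).map (fun lp =>
      (List.range lp.2.toNat).map (fun (t : Nat) =>
        decide (lp.1.2 ≤ right.getD ((t : Int) + lp.1.1 - minW).toNat 0 - left.getD t 0)))
    (matrix, levels)

-- ===== PRECONDITION & SPEC =====
-- Pre_ excludes only w0 = 0, where A raises ZeroDivisionError on 'n // w0'
def Pre_build_dense_indicator (timestamps : List Int) (w0 : Int) (theta0 : Int) (n : Int) : Prop :=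
  w0 ≠ 0
instance (timestamps : List Int) (w0 : Int) (theta0 : Int) (n : Int) : Decidable (Pre_build_dense_indicator timestamps w0 theta0 n) := by unfold Pre_build_dense_indicator; infer_instance
def pvWitness_build_dense_indicator : List Int × Int × Int × Int := ([0, 2, 3], 1, 1, 4)

def Spec_build_dense_indicator (timestamps : List Int) (w0 : Int) (theta0 : Int) (n : Int) (out : List (List Bool) × (List (Int × Int))) : Prop := out = build_dense_indicator_alt timestamps w0 theta0 n
instance (timestamps : List Int) (w0 : Int) (theta0 : Int) (n : Int) (out : List (List Bool) × (List (Int × Int))) : Decidable (Spec_build_dense_indicator timestamps w0 theta0 n out) := by unfold Spec_build_dense_indicator; infer_instance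

-- ===== CLAIM (what is proved, stated in full; the proofs are below) =====
def Claim_equal_build_dense_indicator : Prop := ∀ (timestamps : List Int) (w0 : Int) (theta0 : Int) (n : Int), Dom_build_dense_indicator timestamps w0 theta0 n → Pre_build_dense_indicator timestamps w0 theta0 n → Spec_build_dense_indicator timestamps w0 theta0 n (build_dense_indicator timestamps w0 theta0 n)

-- ===== LEMMAS AND PROOFS =====

-- the level schedule both loops compute
def pvSched (theta0 : Int) (n : Int) : Nat → Int → Int → List (Int × Int)
  | 0, _, _ => []
  | c + 1, w, scale =>
    if n < w then []
    else (w, max 1 (theta0 * scale)) :: pvSched theta0 n c (w * 2) (scale * 2)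

lemma pvBLevels_eq (theta0 n : Int) : ∀ (c : Nat) (w scale : Int) (lp : List (Int × Int)),
    pvBLevels theta0 n c w scale lp = lp ++ pvSched theta0 n c w scale := by
  intro c
  induction c with
  | zero => intro w scale lp; simp [pvBLevels, pvSched]
  | succ c ih =>
    intro w scale lp
    simp only [pvBLevels, pvSched]
    split_ifs with h
    · simp
    · rw [ih]; simp

lemma pvALoop_eq (ts : List Int) (w0 theta0 n : Int) :
    ∀ (c e0 : Nat) (mat : List (List Bool)) (lp : List (Int × Int)),
    pvALoop ts w0 theta0 n ((List.range c).map (fun k => e0 + k)) mat lp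
      = (mat ++ (pvSched theta0 n c (2 ^ e0 * w0) (2 ^ e0)).map (fun l => pvRowA ts l.1 l.2 n),
         lp ++ pvSched theta0 n c (2 ^ e0 * w0) (2 ^ e0)) := by
  intro c
  induction c with
  | zero => intro e0 mat lp; simp [pvALoop, pvSched]
  | succ c ih =>
    intro e0 mat lp
    have hr : (List.range (c + 1)).map (fun k => e0 + k)
        = e0 :: (List.range c).map (fun k => (e0 + 1) + k) := by
      rw [List.range_succ_eq_map, List.map_cons, List.map_map]
      refine congrArg₂ _ (by simp) ?_
      exact List.map_congr_left (fun k _ => by simp [Function.comp]; omega)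
    rw [hr]
    simp only [pvALoop, pvSched]
    split_ifs with h
    · simp
    · rw [ih]
      have h2 : 2 ^ (e0 + 1) * w0 = 2 ^ e0 * w0 * 2 := by ring
      have h3 : (2 : Int) ^ (e0 + 1) = 2 ^ e0 * 2 := by ring
      rw [h2, h3]
      simp

lemma pvSched_mem_le (theta0 n : Int) : ∀ (c : Nat) (w scale : Int) (p : Int × Int),
    p ∈ pvSched theta0 n c w scale → p.1 ≤ n := by
  intro c
  induction c with
  | zero => intro w scale p hp; simp [pvSched] at hp
  | succ c ih =>
    intro w scale p hp
    simp only [pvSched] at hp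
    split_ifs at hp with h
    · simp at hp
    · rcases List.mem_cons.1 hp with h1 | h2
      · subst h1; omega
      · exact ih _ _ _ h2

lemma pvSize_eq_log2 (m : Nat) (h : 1 ≤ m) : Nat.size m = Nat.log2 m + 1 := by
  have h1 : 2 ^ Nat.log2 m ≤ m := Nat.log2_self_le (by omega)
  have h2 : Nat.log2 m < Nat.size m := (Nat.lt_size).2 h1
  have h3 : Nat.size m ≤ Nat.log2 m + 1 := (Nat.size_le).2 (Nat.lt_log2_self)
  omega

-- per-level: B's table-lookup row equals A's bisect row
lemma pvRow_eq (ts : List Int) (n : Int) (levels : List (Int × Int)) (hne : levels ≠ [])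
    (p : Int × Int) (hp : p ∈ levels) (hle : ∀ q ∈ levels, q.1 ≤ n) :
    (List.range (max 0 (n - p.1 + 1)).toNat).map (fun (t : Nat) =>
        decide (p.2 ≤ ((PySem.List.pyRange ((PySem.List.min? (levels.map Prod.fst) id).getD 0) (n + 1)).map
                  (fun v => (PySem.List.bisectRight ts v : Int))).getD
                ((t : Int) + p.1 - (PySem.List.min? (levels.map Prod.fst) id).getD 0).toNat 0
              - ((List.range ((PySem.List.max? (levels.map (fun l => max 0 (n - l.1 + 1))) id).getD 0).toNat).map
                  (fun (t : Nat) => (PySem.List.bisectLeft ts (t : Int) : Int))).getD t 0))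
      = pvRowA ts p.1 p.2 n := by
  classical
  obtain ⟨w, theta⟩ := p
  -- min? and max? are some on a nonempty list
  obtain ⟨mw, hmw⟩ : ∃ mw, PySem.List.min? (levels.map Prod.fst) id = some mw := by
    cases hmin : PySem.List.min? (levels.map Prod.fst) id with
    | none => exact absurd ((PySem.List.min?_eq_none_iff _ _).1 hmin) (by simp [hne])
    | some mw => exact ⟨mw, rfl⟩
  obtain ⟨mp, hmp⟩ : ∃ mp, PySem.List.max? (levels.map (fun l => max 0 (n - l.1 + 1))) id = some mp := by
    cases hmax : PySem.List.max? (levels.map (fun l => max 0 (n - l.1 + 1))) id with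
    | none => exact absurd ((PySem.List.max?_eq_none_iff _ _).1 hmax) (by simp [hne])
    | some mp => exact ⟨mp, rfl⟩
  have hminW : mw ≤ w := by
    have := PySem.List.min?_isMin hmw (y := w) (by exact List.mem_map.2 ⟨(w, theta), hp, rfl⟩)
    simpa using this
  have hmaxP : max 0 (n - w + 1) ≤ mp := by
    have := PySem.List.max?_isMax hmp (y := max 0 (n - w + 1))
      (List.mem_map.2 ⟨(w, theta), hp, rfl⟩)
    simpa using this
  have hwn : w ≤ n := hle _ hp
  have hmwn : mw ≤ n := le_trans hminW hwn
  rw [hmw, hmp]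
  simp only [Option.getD_some]
  unfold pvRowA
  apply List.map_congr_left
  intro t ht
  have htlt : (t : Int) < max 0 (n - w + 1) := by
    have := List.mem_range.1 ht
    omega
  have ht0 : (0 : Int) ≤ t := Int.natCast_nonneg t
  -- left table
  have hleft : ((List.range mp.toNat).map (fun (t : Nat) => (PySem.List.bisectLeft ts (t : Int) : Int))).getD
      t 0 = (PySem.List.bisectLeft ts (t : Int) : Int) := by
    have htm : t < mp.toNat := by omega
    simpa using PySem.List.getD_map_range (fun t : Nat => (PySem.List.bisectLeft ts (t : Int) : Int)) mp.toNat t 0 htm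
  -- right table
  have hright : ((PySem.List.pyRange mw (n + 1)).map (fun v => (PySem.List.bisectRight ts v : Int))).getD
      ((t : Int) + w - mw).toNat 0 = (PySem.List.bisectRight ts ((t : Int) + w) : Int) := by
    rw [PySem.List.pyRange_of_pos mw (n + 1) (by norm_num)]
    rw [List.map_map]
    have hK : (if mw < n + 1 then ((n + 1 - mw + 1 - 1) / 1).toNat else 0) = (n + 1 - mw).toNat := by
      rw [if_pos (by omega)]
      norm_num
    rw [hK]
    have hidx : ((t : Int) + w - mw).toNat < (n + 1 - mw).toNat := by omega
    rw [PySem.List.getD_map_range _ _ _ _ hidx]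
    simp only [Function.comp_apply]
    rw [show mw + 1 * ((((t : Int) + w - mw).toNat : Int)) = (t : Int) + w from by omega]
  simp only [hleft, hright]

-- ===== VERDICT (by name: the statement is the Claim_ definition above) =====
theorem build_dense_indicator_spec : Claim_equal_build_dense_indicator := by
  intro timestamps w0 theta0 n _hDom _hPre
  unfold Spec_build_dense_indicator
  unfold build_dense_indicator build_dense_indicator_alt
  simp only []
  set m : Int := max 1 (PySem.Int.floordiv n w0) with hm
  have hm1 : 1 ≤ m := le_max_left _ _
  have hcount : Nat.size m.toNat = Nat.log2 m.toNat + 1 :=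
    pvSize_eq_log2 m.toNat (by omega)
  rw [pvBLevels_eq, hcount]
  set levels := pvSched theta0 n (Nat.log2 m.toNat + 1) w0 1 with hlv
  have hA := pvALoop_eq timestamps w0 theta0 n (Nat.log2 m.toNat + 1) 0 [] []
  have hr0 : (List.range (Nat.log2 m.toNat + 1)).map (fun k => 0 + k)
      = List.range (Nat.log2 m.toNat + 1) := by simp
  rw [hr0] at hA
  simp only [pow_zero, one_mul, List.nil_append] at hA
  rw [hA]
  by_cases hne : levels = []
  · simp [hne, ← hlv]
  · rw [if_neg (by simpa [List.isEmpty_iff] using hne)]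
    simp only [List.nil_append]
    have hzip : ∀ (L : List (Int × Int)), L.zip (L.map (fun l => max 0 (n - l.1 + 1)))
        = L.map (fun l => (l, max 0 (n - l.1 + 1))) := by
      intro L
      induction L with
      | nil => simp
      | cons a L ih => simp [ih]
    rw [hzip levels, List.map_map]
    simp only [Prod.mk.injEq]
    refine ⟨?_, rfl⟩
    symm
    apply List.map_congr_left
    intro p hp
    exact pvRow_eq timestamps n levels hne p hp
      (fun q hq => pvSched_mem_le theta0 n _ _ _ _ hq)
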